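-- pv_equiv track=rewrite | github.com/sandaramet/covid-statistic-bot | functions.py | dotEveryThreeNumber
-- ===== SOURCE A (Python) =====
-- def dotEveryThreeNumber(number):
--     strNumber = str(number)
--     splitNumber = list(strNumber)
--     lenNumber = len(strNumber)
--     i = lenNumber - 1
--     while i > 0:
--         if(i == lenNumber - 3 or i == lenNumber - 6 or i == lenNumber - 9):
--             splitNumber.insert(i, ".")
--         i -= 1
--     number = "".join(splitNumber)
--     return number
-- ===== SOURCE B (Python) =====
-- def dotEveryThreeNumber(number):
--     s = str(number)
--     n = len(s)
--     cuts = [0] + [p for p in (n - 9, n - 6, n - 3) if p > 0] + [n]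
--     return ".".join(s[a:b] for a, b in zip(cuts, cuts[1:]))
-- ===== Notes on version B (the rewrite author's own statement) =====
-- stated objective: simpler
-- what changed: Replaces the per-index countdown loop with list insertions by computing the (at most three) cut positions len-9/len-6/len-3 up front and joining the slices between consecutive cuts with '.'.
import Mathlib
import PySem

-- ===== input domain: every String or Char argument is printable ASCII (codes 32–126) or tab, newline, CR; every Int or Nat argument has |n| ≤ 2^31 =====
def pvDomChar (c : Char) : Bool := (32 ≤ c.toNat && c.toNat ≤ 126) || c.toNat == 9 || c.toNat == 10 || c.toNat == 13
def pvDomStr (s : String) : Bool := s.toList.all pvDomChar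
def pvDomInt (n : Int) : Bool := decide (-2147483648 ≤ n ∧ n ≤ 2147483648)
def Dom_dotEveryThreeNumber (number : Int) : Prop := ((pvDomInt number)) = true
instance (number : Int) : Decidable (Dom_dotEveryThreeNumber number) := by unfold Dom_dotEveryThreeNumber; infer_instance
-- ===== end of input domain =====

-- B replaces A's per-index countdown loop (with list insertions) by computing the cut
-- positions len-3/len-6/len-9 up front and joining the slices between them: simpler, one pass.


-- ===== PORT A =====
def dotEveryThreeNumber (number : Int) : String :=
  let strNumber : String := PySem.Int.toStr number
  let splitNumber : List Char := strNumber.toList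
  let lenNumber : Int := PySem.Str.len strNumber
  -- while i > 0 with i from lenNumber-1 down to 1, inserting "." at the three cut indices
  let final : List Char :=
    (PySem.List.pyRange (lenNumber - 1) 0 (-1)).foldl
      (fun acc i =>
        if i == lenNumber - 3 || i == lenNumber - 6 || i == lenNumber - 9 then
          PySem.List.insert acc i '.'
        else acc)
      splitNumber
  String.ofList final

-- ===== PORT B =====
def dotEveryThreeNumber_alt (number : Int) : String :=
  let s : String := PySem.Int.toStr number
  let n : Int := PySem.Str.len s
  let cuts : List Int := 0 :: ([n - 9, n - 6, n - 3].filter (fun p => decide (0 < p)) ++ [n])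
  let pieces : List String := (cuts.zip cuts.tail).map (fun ab => PySem.Str.slice s (some ab.1) (some ab.2))
  PySem.Str.join "." pieces

-- ===== PRECONDITION & SPEC =====
def Spec_dotEveryThreeNumber (number : Int) (out : String) : Prop := out = dotEveryThreeNumber_alt number
instance (number : Int) (out : String) : Decidable (Spec_dotEveryThreeNumber number out) := by unfold Spec_dotEveryThreeNumber; infer_instance

-- ===== CLAIM (what is proved, stated in full; the proofs are below) =====
def Claim_equal_dotEveryThreeNumber : Prop := ∀ (number : Int), Dom_dotEveryThreeNumber number → Spec_dotEveryThreeNumber number (dotEveryThreeNumber number)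

-- ===== LEMMAS AND PROOFS =====

-- A conditional foldl is a foldl over the filtered list.
lemma pv_foldl_filter {α : Type} (g : List α → Int → List α) (P : Int → Bool) :
    ∀ (xs : List Int) (init : List α),
      xs.foldl (fun acc i => if P i then g acc i else acc) init = (xs.filter P).foldl g init := by
  intro xs
  induction xs with
  | nil => intro init; rfl
  | cons x xs ih =>
      intro init
      by_cases h : P x = true
      · simp [h, ih]
      · simp [h, ih]

-- The indices A actually inserts at, in the order the countdown loop meets them.
lemma pv_range_filter (m : Int) :
    (PySem.List.pyRange (m - 1) 0 (-1)).filter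
        (fun i => i == m - 3 || i == m - 6 || i == m - 9)
    = [m - 3, m - 6, m - 9].filter (fun p => decide (0 < p)) := by
  have hrev : PySem.List.pyRange (m - 1) 0 (-1) = (PySem.List.pyRange 1 m).reverse := by
    rw [PySem.List.pyRange_neg_one_eq_reverse]; norm_num
  rw [hrev, List.filter_reverse]
  by_cases hm : m ≤ 3
  · have h1 : (PySem.List.pyRange 1 m).filter
        (fun i => i == m - 3 || i == m - 6 || i == m - 9) = [] := by
      rw [List.filter_eq_nil_iff]
      intro x hx
      rw [PySem.List.mem_pyRange_one] at hx
      simp only [Bool.or_eq_true, beq_iff_eq]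
      omega
    have e3 : ¬ ((3:Int) < m) := by omega
    have e6 : ¬ ((6:Int) < m) := by omega
    have e9 : ¬ ((9:Int) < m) := by omega
    simp [h1, List.filter, e3, e6, e9]
  by_cases hm6 : m ≤ 6
  · -- 4 ≤ m ≤ 6 : only m-3 survives
    have hsplit : PySem.List.pyRange 1 m
        = PySem.List.pyRange 1 (m-3) ++ (PySem.List.pyRange (m-3) (m-2) ++ PySem.List.pyRange (m-2) m) := by
      rw [PySem.List.pyRange_one_append 1 (m-3) m (by omega) (by omega),
          PySem.List.pyRange_one_append (m-3) (m-2) m (by omega) (by omega)]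
    have hsingle : PySem.List.pyRange (m-3) (m-2) = [m-3] := by
      have := PySem.List.pyRange_one_singleton (m-3)
      simpa [show m - 3 + 1 = m - 2 by ring] using this
    have hlo : (PySem.List.pyRange 1 (m-3)).filter
        (fun i => i == m - 3 || i == m - 6 || i == m - 9) = [] := by
      rw [List.filter_eq_nil_iff]; intro x hx
      rw [PySem.List.mem_pyRange_one] at hx
      simp only [Bool.or_eq_true, beq_iff_eq]; omega
    have hhi : (PySem.List.pyRange (m-2) m).filter
        (fun i => i == m - 3 || i == m - 6 || i == m - 9) = [] := by
      rw [List.filter_eq_nil_iff]; intro x hx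
      rw [PySem.List.mem_pyRange_one] at hx
      simp only [Bool.or_eq_true, beq_iff_eq]; omega
    have e3 : (3:Int) < m := by omega
    have e6 : ¬ ((6:Int) < m) := by omega
    have e9 : ¬ ((9:Int) < m) := by omega
    simp [hsplit, hsingle, List.filter_append, hlo, hhi, List.filter, e3, e6, e9]
  by_cases hm9 : m ≤ 9
  · -- 7 ≤ m ≤ 9 : m-3 and m-6 survive
    have hsplit : PySem.List.pyRange 1 m
        = PySem.List.pyRange 1 (m-6) ++ (PySem.List.pyRange (m-6) (m-5)
          ++ (PySem.List.pyRange (m-5) (m-3) ++ (PySem.List.pyRange (m-3) (m-2)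
          ++ PySem.List.pyRange (m-2) m))) := by
      rw [PySem.List.pyRange_one_append 1 (m-6) m (by omega) (by omega),
          PySem.List.pyRange_one_append (m-6) (m-5) m (by omega) (by omega),
          PySem.List.pyRange_one_append (m-5) (m-3) m (by omega) (by omega),
          PySem.List.pyRange_one_append (m-3) (m-2) m (by omega) (by omega)]
    have hs6 : PySem.List.pyRange (m-6) (m-5) = [m-6] := by
      have := PySem.List.pyRange_one_singleton (m-6)
      simpa [show m - 6 + 1 = m - 5 by ring] using this
    have hs3 : PySem.List.pyRange (m-3) (m-2) = [m-3] := by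
      have := PySem.List.pyRange_one_singleton (m-3)
      simpa [show m - 3 + 1 = m - 2 by ring] using this
    have hlo : (PySem.List.pyRange 1 (m-6)).filter
        (fun i => i == m - 3 || i == m - 6 || i == m - 9) = [] := by
      rw [List.filter_eq_nil_iff]; intro x hx
      rw [PySem.List.mem_pyRange_one] at hx
      simp only [Bool.or_eq_true, beq_iff_eq]; omega
    have hmid : (PySem.List.pyRange (m-5) (m-3)).filter
        (fun i => i == m - 3 || i == m - 6 || i == m - 9) = [] := by
      rw [List.filter_eq_nil_iff]; intro x hx
      rw [PySem.List.mem_pyRange_one] at hx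
      simp only [Bool.or_eq_true, beq_iff_eq]; omega
    have hhi : (PySem.List.pyRange (m-2) m).filter
        (fun i => i == m - 3 || i == m - 6 || i == m - 9) = [] := by
      rw [List.filter_eq_nil_iff]; intro x hx
      rw [PySem.List.mem_pyRange_one] at hx
      simp only [Bool.or_eq_true, beq_iff_eq]; omega
    have e3 : (3:Int) < m := by omega
    have e6 : (6:Int) < m := by omega
    have e9 : ¬ ((9:Int) < m) := by omega
    simp [hsplit, hs6, hs3, List.filter_append, hlo, hmid, hhi, List.filter, e3, e6, e9]
  · -- m ≥ 10 : all three survive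
    have hsplit : PySem.List.pyRange 1 m
        = PySem.List.pyRange 1 (m-9) ++ (PySem.List.pyRange (m-9) (m-8)
          ++ (PySem.List.pyRange (m-8) (m-6) ++ (PySem.List.pyRange (m-6) (m-5)
          ++ (PySem.List.pyRange (m-5) (m-3) ++ (PySem.List.pyRange (m-3) (m-2)
          ++ PySem.List.pyRange (m-2) m))))) := by
      rw [PySem.List.pyRange_one_append 1 (m-9) m (by omega) (by omega),
          PySem.List.pyRange_one_append (m-9) (m-8) m (by omega) (by omega),
          PySem.List.pyRange_one_append (m-8) (m-6) m (by omega) (by omega),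
          PySem.List.pyRange_one_append (m-6) (m-5) m (by omega) (by omega),
          PySem.List.pyRange_one_append (m-5) (m-3) m (by omega) (by omega),
          PySem.List.pyRange_one_append (m-3) (m-2) m (by omega) (by omega)]
    have hs9 : PySem.List.pyRange (m-9) (m-8) = [m-9] := by
      have := PySem.List.pyRange_one_singleton (m-9)
      simpa [show m - 9 + 1 = m - 8 by ring] using this
    have hs6 : PySem.List.pyRange (m-6) (m-5) = [m-6] := by
      have := PySem.List.pyRange_one_singleton (m-6)
      simpa [show m - 6 + 1 = m - 5 by ring] using this
    have hs3 : PySem.List.pyRange (m-3) (m-2) = [m-3] := by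
      have := PySem.List.pyRange_one_singleton (m-3)
      simpa [show m - 3 + 1 = m - 2 by ring] using this
    have hA : (PySem.List.pyRange 1 (m-9)).filter
        (fun i => i == m - 3 || i == m - 6 || i == m - 9) = [] := by
      rw [List.filter_eq_nil_iff]; intro x hx
      rw [PySem.List.mem_pyRange_one] at hx
      simp only [Bool.or_eq_true, beq_iff_eq]; omega
    have hB : (PySem.List.pyRange (m-8) (m-6)).filter
        (fun i => i == m - 3 || i == m - 6 || i == m - 9) = [] := by
      rw [List.filter_eq_nil_iff]; intro x hx
      rw [PySem.List.mem_pyRange_one] at hx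
      simp only [Bool.or_eq_true, beq_iff_eq]; omega
    have hC : (PySem.List.pyRange (m-5) (m-3)).filter
        (fun i => i == m - 3 || i == m - 6 || i == m - 9) = [] := by
      rw [List.filter_eq_nil_iff]; intro x hx
      rw [PySem.List.mem_pyRange_one] at hx
      simp only [Bool.or_eq_true, beq_iff_eq]; omega
    have hD : (PySem.List.pyRange (m-2) m).filter
        (fun i => i == m - 3 || i == m - 6 || i == m - 9) = [] := by
      rw [List.filter_eq_nil_iff]; intro x hx
      rw [PySem.List.mem_pyRange_one] at hx
      simp only [Bool.or_eq_true, beq_iff_eq]; omega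
    have e3 : (3:Int) < m := by omega
    have e6 : (6:Int) < m := by omega
    have e9 : (9:Int) < m := by omega
    simp [hsplit, hs9, hs6, hs3, List.filter_append, hA, hB, hC, hD, List.filter,
      e3, e6, e9]

-- Nested-insert normal form of one insertion step.
lemma pv_insert_step (xs ys : List Char) (c : Char) (k : Nat) (hk : k ≤ xs.length) :
    PySem.List.insert (xs ++ c :: ys) ((k : Nat) : Int) '.'
      = (xs.take k ++ '.' :: (xs.drop k ++ c :: ys)) := by
  rw [PySem.List.insert_natCast _ _ _ (by simp; omega),
      List.take_append_of_le_length (by simpa using hk),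
      List.drop_append_of_le_length (by simpa using hk)]

-- The core list-level equality between the two algorithms (any character list).
lemma pv_core (l : List Char) :
    (PySem.List.pyRange ((l.length : Int) - 1) 0 (-1)).foldl
      (fun acc i =>
        if i == (l.length : Int) - 3 || i == (l.length : Int) - 6 || i == (l.length : Int) - 9 then
          PySem.List.insert acc i '.'
        else acc) l
    = PySem.Chars.join ['.']
        (((0 :: ([(l.length : Int) - 9, (l.length : Int) - 6, (l.length : Int) - 3].filter
              (fun p => decide (0 < p)) ++ [(l.length : Int)])).zip
          ((0 :: ([(l.length : Int) - 9, (l.length : Int) - 6, (l.length : Int) - 3].filter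
              (fun p => decide (0 < p)) ++ [(l.length : Int)])).tail)).map
          (fun ab => PySem.Chars.slice l (some ab.1) (some ab.2))) := by
  rw [pv_foldl_filter (fun acc i => PySem.List.insert acc i '.')
        (fun i => i == (l.length : Int) - 3 || i == (l.length : Int) - 6 || i == (l.length : Int) - 9)
        (PySem.List.pyRange ((l.length : Int) - 1) 0 (-1)) l,
      pv_range_filter ((l.length : Int))]
  by_cases h3 : l.length ≤ 3
  · -- no cut
    have f3 : ¬ (3 < l.length) := by omega
    have f6 : ¬ (6 < l.length) := by omega
    have f9 : ¬ (9 < l.length) := by omega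
    have hs : PySem.List.slice l none (some ((l.length : Int))) = l := by
      rw [PySem.List.slice_to_natCast]
      simp
    simp [List.filter, f3, f6, f9, PySem.Chars.join, hs, List.intercalate]
  by_cases h6 : l.length ≤ 6
  · -- one cut at len-3
    have f3 : 3 < l.length := by omega
    have f6 : ¬ (6 < l.length) := by omega
    have f9 : ¬ (9 < l.length) := by omega
    have i1 : PySem.List.insert l ((l.length : Int) - 3) '.'
        = l.take (l.length - 3) ++ '.' :: l.drop (l.length - 3) := by
      rw [show ((l.length : Int) - 3) = ((l.length - 3 : Nat) : Int) by omega]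
      exact PySem.List.insert_natCast _ _ _ (by omega)
    have s1 : PySem.List.slice l none (some ((l.length : Int) - 3)) = l.take (l.length - 3) := by
      rw [show ((l.length : Int) - 3) = ((l.length - 3 : Nat) : Int) by omega, PySem.List.slice_to_natCast]
    have s2 : PySem.List.slice l (some ((l.length : Int) - 3)) (some ((l.length : Int)))
        = l.drop (l.length - 3) := by
      rw [show ((l.length : Int) - 3) = ((l.length - 3 : Nat) : Int) by omega, PySem.List.slice_natCast]
      exact List.take_of_length_le (by simp)
    simp [List.filter, f3, f6, f9, PySem.Chars.join, i1, s1, s2, List.intercalate]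
  by_cases h9 : l.length ≤ 9
  · -- cuts at len-6, len-3
    have f3 : 3 < l.length := by omega
    have f6 : 6 < l.length := by omega
    have f9 : ¬ (9 < l.length) := by omega
    have i1 : PySem.List.insert l ((l.length : Int) - 3) '.'
        = l.take (l.length - 3) ++ '.' :: l.drop (l.length - 3) := by
      rw [show ((l.length : Int) - 3) = ((l.length - 3 : Nat) : Int) by omega]
      exact PySem.List.insert_natCast _ _ _ (by omega)
    have i2 : PySem.List.insert (l.take (l.length - 3) ++ '.' :: l.drop (l.length - 3))
          ((l.length : Int) - 6) '.'
        = (l.take (l.length - 3)).take (l.length - 6)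
            ++ '.' :: ((l.take (l.length - 3)).drop (l.length - 6) ++ '.' :: l.drop (l.length - 3)) := by
      rw [show ((l.length : Int) - 6) = ((l.length - 6 : Nat) : Int) by omega]
      exact pv_insert_step _ _ _ _ (by simp; omega)
    have s1 : PySem.List.slice l none (some ((l.length : Int) - 6)) = l.take (l.length - 6) := by
      rw [show ((l.length : Int) - 6) = ((l.length - 6 : Nat) : Int) by omega, PySem.List.slice_to_natCast]
    have s2 : PySem.List.slice l (some ((l.length : Int) - 6)) (some ((l.length : Int) - 3))
        = ((l.drop (l.length - 6)).take ((l.length - 3) - (l.length - 6))) := by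
      rw [show ((l.length : Int) - 6) = ((l.length - 6 : Nat) : Int) by omega, show ((l.length : Int) - 3) = ((l.length - 3 : Nat) : Int) by omega, PySem.List.slice_natCast]
    have s3 : PySem.List.slice l (some ((l.length : Int) - 3)) (some ((l.length : Int)))
        = l.drop (l.length - 3) := by
      rw [show ((l.length : Int) - 3) = ((l.length - 3 : Nat) : Int) by omega, PySem.List.slice_natCast]
      exact List.take_of_length_le (by simp)
    simp [List.filter, f3, f6, f9, PySem.Chars.join, i1, i2, s1, s2, s3, List.intercalate,
      List.take_take, List.drop_take, min_eq_left (by omega : l.length - 6 ≤ l.length - 3)]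
  · -- cuts at len-9, len-6, len-3
    have f3 : 3 < l.length := by omega
    have f6 : 6 < l.length := by omega
    have f9 : 9 < l.length := by omega
    have i1 : PySem.List.insert l ((l.length : Int) - 3) '.'
        = l.take (l.length - 3) ++ '.' :: l.drop (l.length - 3) := by
      rw [show ((l.length : Int) - 3) = ((l.length - 3 : Nat) : Int) by omega]
      exact PySem.List.insert_natCast _ _ _ (by omega)
    have i2 : PySem.List.insert (l.take (l.length - 3) ++ '.' :: l.drop (l.length - 3))
          ((l.length : Int) - 6) '.'
        = (l.take (l.length - 3)).take (l.length - 6)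
            ++ '.' :: ((l.take (l.length - 3)).drop (l.length - 6) ++ '.' :: l.drop (l.length - 3)) := by
      rw [show ((l.length : Int) - 6) = ((l.length - 6 : Nat) : Int) by omega]
      exact pv_insert_step _ _ _ _ (by simp; omega)
    have i2' : (l.take (l.length - 3)).take (l.length - 6)
            ++ '.' :: ((l.take (l.length - 3)).drop (l.length - 6) ++ '.' :: l.drop (l.length - 3))
        = l.take (l.length - 6)
            ++ '.' :: ((l.take (l.length - 3)).drop (l.length - 6) ++ '.' :: l.drop (l.length - 3)) := by
      rw [List.take_take, min_eq_left (by omega)]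
    have i3 : PySem.List.insert (l.take (l.length - 6)
            ++ '.' :: ((l.take (l.length - 3)).drop (l.length - 6) ++ '.' :: l.drop (l.length - 3)))
          ((l.length : Int) - 9) '.'
        = (l.take (l.length - 6)).take (l.length - 9)
            ++ '.' :: ((l.take (l.length - 6)).drop (l.length - 9)
              ++ '.' :: ((l.take (l.length - 3)).drop (l.length - 6) ++ '.' :: l.drop (l.length - 3))) := by
      rw [show ((l.length : Int) - 9) = ((l.length - 9 : Nat) : Int) by omega]
      exact pv_insert_step _ _ _ _ (by simp; omega)
    have s1 : PySem.List.slice l none (some ((l.length : Int) - 9)) = l.take (l.length - 9) := by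
      rw [show ((l.length : Int) - 9) = ((l.length - 9 : Nat) : Int) by omega, PySem.List.slice_to_natCast]
    have s2 : PySem.List.slice l (some ((l.length : Int) - 9)) (some ((l.length : Int) - 6))
        = ((l.drop (l.length - 9)).take ((l.length - 6) - (l.length - 9))) := by
      rw [show ((l.length : Int) - 9) = ((l.length - 9 : Nat) : Int) by omega, show ((l.length : Int) - 6) = ((l.length - 6 : Nat) : Int) by omega, PySem.List.slice_natCast]
    have s3 : PySem.List.slice l (some ((l.length : Int) - 6)) (some ((l.length : Int) - 3))
        = ((l.drop (l.length - 6)).take ((l.length - 3) - (l.length - 6))) := by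
      rw [show ((l.length : Int) - 6) = ((l.length - 6 : Nat) : Int) by omega, show ((l.length : Int) - 3) = ((l.length - 3 : Nat) : Int) by omega, PySem.List.slice_natCast]
    have s4 : PySem.List.slice l (some ((l.length : Int) - 3)) (some ((l.length : Int)))
        = l.drop (l.length - 3) := by
      rw [show ((l.length : Int) - 3) = ((l.length - 3 : Nat) : Int) by omega, PySem.List.slice_natCast]
      exact List.take_of_length_le (by simp)
    have lhs_eq : List.foldl (fun acc i => PySem.List.insert acc i '.') l
        [((l.length : Int) - 3), ((l.length : Int) - 6), ((l.length : Int) - 9)]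
        = List.take (l.length - 9) l
          ++ '.' :: (List.take (l.length - 6 - (l.length - 9)) (List.drop (l.length - 9) l)
          ++ '.' :: (List.take (l.length - 3 - (l.length - 6)) (List.drop (l.length - 6) l)
          ++ '.' :: List.drop (l.length - 3) l)) := by
      simp only [List.foldl_cons, List.foldl_nil]
      rw [i1, i2, i2', i3, List.take_take, min_eq_left (by omega), List.drop_take, List.drop_take]
    simp [List.filter, f3, f6, f9, PySem.Chars.join, lhs_eq, s1, s2, s3, s4,
      List.intercalate]

-- ===== VERDICT (by name: the statement is the Claim_ definition above) =====
theorem dotEveryThreeNumber_spec : Claim_equal_dotEveryThreeNumber := by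
  intro number _
  unfold Spec_dotEveryThreeNumber dotEveryThreeNumber dotEveryThreeNumber_alt
  simp only [PySem.Str.len_eq, PySem.Str.join, List.map_map, Function.comp_def,
    PySem.Str.toList_slice, PySem.Int.toList_toStr]
  have hdot : ("." : String).toList = ['.'] := by decide
  rw [hdot]
  exact congrArg String.ofList (by
    have := pv_core (PySem.Int.toChars number)
    simpa using this)
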